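-- pv_equiv track=rewrite | github.com/nfatkhi/stocker | tools/unified_dataset_organizer.py | _rank_concepts_by_frequency
-- ===== SOURCE A (Python) =====
-- from typing import Dict, Any, List, Optional
-- from typing import Dict, Any, List, Optional
-- from typing import Dict, Any, List, Optional
--
-- def _rank_concepts_by_frequency(concepts: List[str], preferred_order: List[str]) -> List[str]:
--     """Rank concepts by preferred order and frequency"""
--     ranked = []
--
--     # Add preferred concepts first (if they exist in the list)
--     for preferred in preferred_order:
--         matching = [c for c in concepts if preferred.lower() in c.lower()]
--         ranked.extend(matching)
--
--     # Add remaining concepts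
--     remaining = [c for c in concepts if c not in ranked]
--     ranked.extend(remaining)
--
--     return ranked
-- ===== SOURCE B (Python) =====
-- def _rank_concepts_by_frequency(concepts, preferred_order):
--     """Rank concepts by preferred order and frequency"""
--     # One pass over concepts: build a bucket per preferred term (lowercased once)
--     # plus a remaining list, then emit buckets in order followed by remaining.
--     buckets = [(p.lower(), []) for p in preferred_order]
--     remaining = []
--     for c in concepts:
--         cl = c.lower()
--         matched = False
--         for lp, bucket in buckets:
--             if lp in cl:
--                 bucket.append(c)
--                 matched = True
--         if not matched:
--             remaining.append(c)
--     out = []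
--     for _, bucket in buckets:
--         out.extend(bucket)
--     out.extend(remaining)
--     return out
-- ===== Notes on version B (the rewrite author's own statement) =====
-- stated objective: alternative
-- what changed: Single pass over concepts filling a bucket per preferred term (lowercased once) plus a matched-flag remaining list, then concatenating buckets and remaining, instead of A's one scan of concepts per preferred term followed by a value-membership scan of the ranked list for every concept.
import Mathlib
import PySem

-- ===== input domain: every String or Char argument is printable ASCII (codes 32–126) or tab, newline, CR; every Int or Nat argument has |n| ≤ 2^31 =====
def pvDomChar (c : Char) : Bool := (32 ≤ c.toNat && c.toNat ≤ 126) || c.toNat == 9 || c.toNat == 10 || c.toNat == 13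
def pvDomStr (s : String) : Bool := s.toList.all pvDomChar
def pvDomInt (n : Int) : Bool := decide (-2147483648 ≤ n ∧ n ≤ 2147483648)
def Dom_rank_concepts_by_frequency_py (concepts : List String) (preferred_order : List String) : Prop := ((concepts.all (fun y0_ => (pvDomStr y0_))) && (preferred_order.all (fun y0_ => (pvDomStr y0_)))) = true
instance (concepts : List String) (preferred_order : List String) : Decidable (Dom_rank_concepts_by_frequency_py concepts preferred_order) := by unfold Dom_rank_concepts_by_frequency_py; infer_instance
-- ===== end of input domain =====

-- B replaces A's per-preferred scans plus a value-membership "remaining" scan by one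
-- bucket-table pass over concepts with a matched flag (objective: alternative decomposition).

-- ===== PORT A =====
-- preferred.lower() in c.lower()
def pvMatch (preferred c : String) : Bool :=
  PySem.Str.isIn (PySem.Str.lower preferred) (PySem.Str.lower c)

def rank_concepts_by_frequency_py (concepts : List String) (preferred_order : List String) : List String :=
  let ranked := preferred_order.foldl
    (fun ranked preferred => ranked ++ concepts.filter (fun c => pvMatch preferred c)) []
  ranked ++ concepts.filter (fun c => !ranked.contains c)

-- ===== PORT B =====
-- inner loop of Source B: walk the (lowered-preferred, bucket) pairs, appending c to each
-- matching bucket (rebuilt functionally) and tracking the matched flag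
def pvInner (lc c : String) (acc : List (String × List String) × Bool)
    (pb : String × List String) : List (String × List String) × Bool :=
  if PySem.Str.isIn pb.1 lc then (acc.1 ++ [(pb.1, pb.2 ++ [c])], true)
  else (acc.1 ++ [pb], acc.2)

-- body of Source B's `for c in concepts` loop
def pvStep (st : List (String × List String) × List String) (c : String) :
    List (String × List String) × List String :=
  let lc := PySem.Str.lower c
  let inner := st.1.foldl (pvInner lc c) ([], false)
  (inner.1, if inner.2 then st.2 else st.2 ++ [c])

def rank_concepts_by_frequency_py_alt (concepts : List String) (preferred_order : List String) : List String :=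
  let buckets0 := preferred_order.map (fun p => (PySem.Str.lower p, ([] : List String)))
  let st := concepts.foldl pvStep (buckets0, ([] : List String))
  st.1.foldl (fun out pb => out ++ pb.2) [] ++ st.2

-- ===== PRECONDITION & SPEC =====
def Spec_rank_concepts_by_frequency_py (concepts : List String) (preferred_order : List String) (out : List String) : Prop := out = rank_concepts_by_frequency_py_alt concepts preferred_order
instance (concepts : List String) (preferred_order : List String) (out : List String) : Decidable (Spec_rank_concepts_by_frequency_py concepts preferred_order out) := by unfold Spec_rank_concepts_by_frequency_py; infer_instance

-- ===== CLAIM (what is proved, stated in full; the proofs are below) =====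
def Claim_equal_rank_concepts_by_frequency_py : Prop := ∀ (concepts : List String) (preferred_order : List String), Dom_rank_concepts_by_frequency_py concepts preferred_order → Spec_rank_concepts_by_frequency_py concepts preferred_order (rank_concepts_by_frequency_py concepts preferred_order)

-- ===== LEMMAS AND PROOFS =====

-- an 'out.extend(g x)' loop is acc ++ flatMap
theorem pv_foldl_flat {α β : Type} (l : List α) (g : α → List β) (acc : List β) :
    l.foldl (fun out x => out ++ g x) acc = acc ++ l.flatMap g := by
  induction l generalizing acc with
  | nil => simp
  | cons x xs ih => simp [List.foldl_cons, ih, List.append_assoc]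

-- the inner bucket pass appends c to every matching bucket and ORs the flag
theorem pv_inner_spec (lc c : String) (bs : List (String × List String))
    (acc : List (String × List String)) (m : Bool) :
    bs.foldl (pvInner lc c) (acc, m)
      = (acc ++ bs.map (fun pb => if PySem.Str.isIn pb.1 lc then (pb.1, pb.2 ++ [c]) else pb),
         m || bs.any (fun pb => PySem.Str.isIn pb.1 lc)) := by
  induction bs generalizing acc m with
  | nil => simp
  | cons pb bs ih =>
    by_cases h : PySem.Chars.isIn pb.1.toList lc.toList = true
    · simp [List.foldl_cons, pvInner, h, ih]
    · simp only [Bool.not_eq_true] at h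
      simp [List.foldl_cons, pvInner, h, ih]

-- invariant of Source B's main loop: buckets = per-preferred filters of processed concepts,
-- remaining = processed concepts matching no preferred
theorem pv_outer_spec (cs ps done : List String) :
    cs.foldl pvStep
      (ps.map (fun p => (PySem.Str.lower p, done.filter (fun c => pvMatch p c))),
       done.filter (fun c => !ps.any (fun p => pvMatch p c)))
    = (ps.map (fun p => (PySem.Str.lower p, (done ++ cs).filter (fun c => pvMatch p c))),
       (done ++ cs).filter (fun c => !ps.any (fun p => pvMatch p c))) := by
  induction cs generalizing done with
  | nil => simp
  | cons c cs ih =>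
    rw [List.foldl_cons]
    have hstep : pvStep
        (ps.map (fun p => (PySem.Str.lower p, done.filter (fun c => pvMatch p c))),
         done.filter (fun c => !ps.any (fun p => pvMatch p c))) c
      = (ps.map (fun p => (PySem.Str.lower p, (done ++ [c]).filter (fun c => pvMatch p c))),
         (done ++ [c]).filter (fun c => !ps.any (fun p => pvMatch p c))) := by
      simp only [pvStep, pv_inner_spec, List.nil_append, Bool.false_or, List.map_map,
        List.any_map, List.filter_append, List.filter_cons, List.filter_nil, Prod.mk.injEq]
      refine ⟨?_, ?_⟩
      · apply List.map_congr_left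
        intro p _
        by_cases h : pvMatch p c = true
        · simp [Function.comp, pvMatch] at h ⊢
          simp [h]
        · simp only [Bool.not_eq_true] at h
          simp [Function.comp, pvMatch] at h ⊢
          simp [h]
      · simp only [Function.comp_def, pvMatch, PySem.Str.isIn_eq, PySem.Str.toList_lower]
        cases h : ps.any fun p => PySem.Chars.isIn (PySem.Chars.lower p.toList) (PySem.Chars.lower c.toList)
        · simp
        · simp
    rw [hstep, ih (done ++ [c]), List.append_assoc]
    simp

-- on any c ∈ concepts, membership of c in A's ranked list is exactly "some preferred matches c"
theorem pv_contains_ranked (concepts ps : List String) (c : String) (hc : c ∈ concepts) :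
    (ps.flatMap (fun p => concepts.filter (fun c => pvMatch p c))).contains c
      = ps.any (fun p => pvMatch p c) := by
  by_cases h : ps.any (fun p => pvMatch p c) = true
  · rcases List.any_eq_true.mp h with ⟨p, hp, hm⟩
    have : c ∈ ps.flatMap (fun p => concepts.filter (fun c => pvMatch p c)) := by
      refine List.mem_flatMap.mpr ⟨p, hp, ?_⟩
      simp [List.mem_filter, hc, hm]
    simp [h, this]
  · simp only [Bool.not_eq_true] at h
    have : c ∉ ps.flatMap (fun p => concepts.filter (fun c => pvMatch p c)) := by
      intro hmem
      rcases List.mem_flatMap.mp hmem with ⟨p, hp, hcf⟩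
      have := (List.mem_filter.mp hcf).2
      have : ps.any (fun p => pvMatch p c) = true := List.any_eq_true.mpr ⟨p, hp, this⟩
      simp [this] at h
    simp [h, this]

-- ===== VERDICT (by name: the statement is the Claim_ definition above) =====
theorem rank_concepts_by_frequency_py_spec : Claim_equal_rank_concepts_by_frequency_py := by
  intro concepts ps _
  unfold Spec_rank_concepts_by_frequency_py
  unfold rank_concepts_by_frequency_py rank_concepts_by_frequency_py_alt
  have hA : ps.foldl (fun ranked p => ranked ++ concepts.filter (fun c => pvMatch p c)) []
      = ps.flatMap (fun p => concepts.filter (fun c => pvMatch p c)) := by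
    simpa using pv_foldl_flat ps (fun p => concepts.filter (fun c => pvMatch p c)) []
  have hB := pv_outer_spec concepts ps []
  simp only [List.filter_nil, List.nil_append] at hB
  simp only [hA, hB]
  rw [pv_foldl_flat]
  simp only [List.nil_append, List.flatMap_map]
  congr 1
  apply List.filter_congr
  intro c hc
  rw [pv_contains_ranked concepts ps c hc]
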